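-- pv_equiv track=rewrite | github.com/WenhanLyu/GroundDB | grounddb/executor.py | _guess_alias_from_column
-- ===== SOURCE A (Python) =====
-- def _guess_alias_from_column(col_name, joined_aliases, next_alias):
--     """Guess which alias a column belongs to based on naming conventions."""
--     all_aliases = list(joined_aliases) + [next_alias]
--     # TPC-H convention: column prefix maps to table name
--     _TABLE_COL_PREFIX = {
--         'l_': 'lineitem', 'o_': 'orders', 'c_': 'customer',
--         's_': 'supplier', 'p_': 'part', 'ps_': 'partsupp',
--         'n_': 'nation', 'r_': 'region',
--     }
--     # Try longer prefixes first (ps_ before p_)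
--     for prefix in sorted(_TABLE_COL_PREFIX.keys(), key=len, reverse=True):
--         if col_name.startswith(prefix):
--             table = _TABLE_COL_PREFIX[prefix]
--             if table in all_aliases:
--                 return table
--             # Also check aliases that might map to this table
--             for alias in all_aliases:
--                 if alias == table:
--                     return alias
--             break
--     # Fallback: first letter match
--     if "_" in col_name:
--         col_prefix = col_name[0]
--         for alias in all_aliases:
--             if alias[0] == col_prefix:
--                 return alias
--     return None
-- ===== SOURCE B (Python) =====
-- _TABLE_COL_PREFIX = {
--     'l_': 'lineitem', 'o_': 'orders', 'c_': 'customer',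
--     's_': 'supplier', 'p_': 'part', 'ps_': 'partsupp',
--     'n_': 'nation', 'r_': 'region',
-- }
--
--
-- def _guess_alias_from_column(col_name, joined_aliases, next_alias):
--     """Guess which alias a column belongs to based on naming conventions."""
--     if '_' not in col_name:
--         return None
--     all_aliases = list(joined_aliases) + [next_alias]
--     # Build the candidate prefix key directly (everything up to the first '_')
--     # and do a single dict lookup instead of scanning the sorted prefix list.
--     key = col_name.split('_', 1)[0] + '_'
--     table = _TABLE_COL_PREFIX.get(key)
--     if table is not None and table in all_aliases:
--         return table
--     # Fallback: first letter match
--     first = col_name[0]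
--     for alias in all_aliases:
--         if alias.startswith(first):
--             return alias
--     return None
-- ===== Notes on version B (the rewrite author's own statement) =====
-- stated objective: simpler
-- what changed: Instead of scanning the prefix dictionary sorted longest-first with startswith tests, an inner alias loop and a break, B builds the candidate key directly from the text before the column's first underscore and does one dict lookup, then the same first-letter fallback.
-- outside the precondition, e.g. on _guess_alias_from_column('l_x', [''], 'lineitem'): A returns 'lineitem', B returns 'lineitem'
import Mathlib
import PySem

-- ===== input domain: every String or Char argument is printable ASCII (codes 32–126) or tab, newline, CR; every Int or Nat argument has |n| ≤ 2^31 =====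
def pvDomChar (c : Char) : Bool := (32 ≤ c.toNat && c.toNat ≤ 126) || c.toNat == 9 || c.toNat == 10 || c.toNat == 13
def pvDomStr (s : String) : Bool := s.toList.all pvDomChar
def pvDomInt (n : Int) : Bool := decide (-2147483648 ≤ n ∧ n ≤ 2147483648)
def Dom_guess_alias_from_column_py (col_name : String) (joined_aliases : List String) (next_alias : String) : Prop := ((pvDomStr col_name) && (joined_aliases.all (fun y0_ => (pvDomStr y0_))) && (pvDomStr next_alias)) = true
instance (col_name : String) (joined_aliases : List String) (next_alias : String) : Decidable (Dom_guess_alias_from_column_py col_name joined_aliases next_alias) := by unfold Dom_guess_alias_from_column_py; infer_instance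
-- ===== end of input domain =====

-- B replaces A's longest-first scan of the sorted prefix dict (plus a redundant inner
-- alias loop) by building the key from the text before the column's first underscore and
-- doing one dict lookup; objective: simpler. Equality of RETURN values is what is proved.

-- ===== PORT A =====
-- the _TABLE_COL_PREFIX dict (same literal in A and B), keyed by the prefix's characters
def pvTableColPrefix : PySem.Dict (List Char) String :=
  PySem.Dict.ofList [(['l','_'], "lineitem"), (['o','_'], "orders"), (['c','_'], "customer"),
    (['s','_'], "supplier"), (['p','_'], "part"), (['p','s','_'], "partsupp"),
    (['n','_'], "nation"), (['r','_'], "region")]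

-- inner loop 'for alias in all_aliases: if alias == table: return alias'
def pvA_aliasScan (table : String) : List String → Option String
  | [] => none
  | a :: rest => if a = table then some a else pvA_aliasScan table rest

-- outer loop 'for prefix in sorted(...)'; 'none' = fell through (or broke) to the fallback
def pvA_prefixLoop (col_name : String) (all_aliases : List String) : List (List Char) → Option String
  | [] => none
  | p :: rest =>
    if PySem.Chars.startswith col_name.toList p then
      match pvTableColPrefix.get? p with
      | some table =>
          if table ∈ all_aliases then some table
          else
            match pvA_aliasScan table all_aliases with
            | some a => some a
            | none => none                 -- 'break': go to the fallback
      | none => none                       -- unreachable: p is drawn from the dict's keys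
    else pvA_prefixLoop col_name all_aliases rest

-- fallback loop 'for alias in all_aliases: if alias[0] == col_prefix: return alias'
def pvA_fallbackLoop (c0 : Char) : List String → Option String
  | [] => none
  | a :: rest =>
    match PySem.Str.pyGet? a 0 with
    | some ch => if ch = c0 then some a else pvA_fallbackLoop c0 rest
    | none => none                         -- Python raises IndexError here (excluded by Pre_)

def guess_alias_from_column_py (col_name : String) (joined_aliases : List String) (next_alias : String) : Option String :=
  let all_aliases := joined_aliases ++ [next_alias]
  match pvA_prefixLoop col_name all_aliases (PySem.List.sorted pvTableColPrefix.keys List.length true) with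
  | some r => some r
  | none =>
    if PySem.Str.isIn "_" col_name then
      match PySem.Str.pyGet? col_name 0 with
      | some c0 => pvA_fallbackLoop c0 all_aliases
      | none => none                       -- unreachable: col_name contains '_'
    else none

-- ===== PORT B =====
-- B's module-level _TABLE_COL_PREFIX dict is the same mapping as A's: pvTableColPrefix above

-- 'for alias in all_aliases: if alias.startswith(first): return alias'
def pvB_fallbackLoop (first : Char) : List String → Option String
  | [] => none
  | a :: rest =>
    if PySem.Chars.startswith a.toList [first] then some a else pvB_fallbackLoop first rest

-- 'first = col_name[0]' then the fallback loop, then 'return None'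
def pvB_fallback (col_name : String) (all_aliases : List String) : Option String :=
  match PySem.Str.pyGet? col_name 0 with
  | some first => pvB_fallbackLoop first all_aliases
  | none => none                           -- unreachable: col_name contains '_'

def guess_alias_from_column_py_alt (col_name : String) (joined_aliases : List String) (next_alias : String) : Option String :=
  if PySem.Str.isIn "_" col_name then
    let all_aliases := joined_aliases ++ [next_alias]
    -- key = col_name.split('_', 1)[0] + '_'
    let key : List Char :=
      match PySem.List.pyGet? (PySem.Chars.splitOnMax col_name.toList ['_'] 1) 0 with
      | some p0 => p0 ++ ['_']
      | none => []                         -- unreachable: split never returns an empty list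
    match pvTableColPrefix.get? key with    -- 'table is not None and table in all_aliases'
    | some table =>
        if table ∈ all_aliases then some table else pvB_fallback col_name all_aliases
    | none => pvB_fallback col_name all_aliases
  else none

-- ===== PRECONDITION & SPEC =====
-- Pre_ excludes inputs where col_name contains '_' and an empty alias string is present:
-- on those A's fallback 'alias[0]' raises IndexError (on a few of them A still returns via
-- the prefix path before reaching the fallback — see the cite in claim.json).
def Pre_guess_alias_from_column_py (col_name : String) (joined_aliases : List String) (next_alias : String) : Prop :=
  PySem.Str.isIn "_" col_name = true → "" ∉ joined_aliases ++ [next_alias]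
instance (col_name : String) (joined_aliases : List String) (next_alias : String) : Decidable (Pre_guess_alias_from_column_py col_name joined_aliases next_alias) := by unfold Pre_guess_alias_from_column_py; infer_instance

def pvWitness_guess_alias_from_column_py : String × List String × String :=
  ("l_quantity", ["lineitem"], "orders")

def Spec_guess_alias_from_column_py (col_name : String) (joined_aliases : List String) (next_alias : String) (out : Option String) : Prop := out = guess_alias_from_column_py_alt col_name joined_aliases next_alias
instance (col_name : String) (joined_aliases : List String) (next_alias : String) (out : Option String) : Decidable (Spec_guess_alias_from_column_py col_name joined_aliases next_alias out) := by unfold Spec_guess_alias_from_column_py; infer_instance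

-- ===== CLAIM (what is proved, stated in full; the proofs are below) =====
def Claim_equal_guess_alias_from_column_py : Prop := ∀ (col_name : String) (joined_aliases : List String) (next_alias : String), Dom_guess_alias_from_column_py col_name joined_aliases next_alias → Pre_guess_alias_from_column_py col_name joined_aliases next_alias → Spec_guess_alias_from_column_py col_name joined_aliases next_alias (guess_alias_from_column_py col_name joined_aliases next_alias)

-- ===== LEMMAS AND PROOFS =====

-- 'sub in s' for a single character is membership
theorem pv_isIn_underscore (col : String) :
    PySem.Str.isIn "_" col = true ↔ '_' ∈ col.toList := by
  rw [PySem.Str.isIn_iff_infix]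
  exact List.singleton_infix_iff '_' col.toList

-- decompose a list at its first underscore
theorem pv_split_at_underscore (l : List Char) (h : '_' ∈ l) :
    l = l.takeWhile (· ≠ '_') ++ '_' :: (l.dropWhile (· ≠ '_')).tail := by
  induction l with
  | nil => cases h
  | cons c rest ih =>
    by_cases hc : c = '_'
    · subst hc; simp
    · have hr : '_' ∈ rest := by
        rcases List.mem_cons.mp h with h | h
        · exact absurd h.symm hc
        · exact h
      simpa [hc] using ih hr

theorem pv_not_mem_takeWhile (l : List Char) : '_' ∉ l.takeWhile (· ≠ '_') := by
  intro h
  have := List.mem_takeWhile_imp h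
  simp at this

-- a prefix of shape w ++ ['_'] matches t ++ '_' :: r exactly when w = t, for '_'-free w, t
theorem pv_prefix_underscore :
    ∀ (w t : List Char), '_' ∉ w → '_' ∉ t → ∀ r : List Char,
      (w ++ ['_'] <+: t ++ '_' :: r) → w = t := by
  intro w
  induction w with
  | nil =>
    intro t _ ht r hp
    cases t with
    | nil => rfl
    | cons b t' =>
      simp only [List.nil_append, List.cons_append, List.cons_prefix_cons] at hp
      exact absurd hp.1.symm (by intro hb; exact ht (hb ▸ List.mem_cons_self ..))
  | cons a w' ih =>
    intro t ha ht r hp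
    cases t with
    | nil =>
      simp only [List.cons_append, List.nil_append, List.cons_prefix_cons] at hp
      exact absurd hp.1 (by intro hb; exact ha (hb ▸ List.mem_cons_self ..))
    | cons b t' =>
      simp only [List.cons_append, List.cons_prefix_cons] at hp
      have := ih t' (fun hx => ha (List.mem_cons_of_mem _ hx))
        (fun hx => ht (List.mem_cons_of_mem _ hx)) r hp.2
      rw [hp.1, this]

-- startswith against each dict prefix, expressed through the first-underscore segment
theorem pv_startswith_iff (l w : List Char) (hw : '_' ∉ w) (hu : '_' ∈ l) :
    PySem.Chars.startswith l (w ++ ['_']) = true ↔ l.takeWhile (· ≠ '_') = w := by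
  rw [PySem.Chars.startswith_iff]
  constructor
  · intro hp
    have hl := pv_split_at_underscore l hu
    rw [hl] at hp
    exact (pv_prefix_underscore w _ hw (pv_not_mem_takeWhile l) _ hp).symm
  · intro ht
    have hl := pv_split_at_underscore l hu
    rw [ht] at hl
    rw [hl]
    exact ⟨(List.dropWhile (· ≠ '_') l).tail, by simp⟩

-- a prefix that contains '_' never matches an underscore-free col_name
theorem pv_startswith_false (l p : List Char) (hp : '_' ∈ p) (hu : '_' ∉ l) :
    PySem.Chars.startswith l p = false := by
  cases hs : PySem.Chars.startswith l p with
  | false => rfl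
  | true =>
    rw [PySem.Chars.startswith_iff] at hs
    exact absurd (hs.subset hp) hu

-- the splitOnMax worker with maxsplit exhausted copies the rest
theorem pv_go_zero (fuel : Nat) (hf : 0 < fuel) (l cur : List Char) (acc : List (List Char)) :
    PySem.Chars.splitOnMax.go ['_'] fuel 0 l cur acc = ((cur.reverse ++ l) :: acc).reverse := by
  cases fuel with
  | zero => omega
  | succ f => cases l <;> simp [PySem.Chars.splitOnMax.go]

-- the splitOnMax worker with maxsplit = 1 splits at the first underscore
theorem pv_go_one (l : List Char) :
    ∀ (fuel : Nat) (cur : List Char) (acc : List (List Char)), l.length < fuel →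
      PySem.Chars.splitOnMax.go ['_'] fuel 1 l cur acc =
        acc.reverse ++
          (if '_' ∈ l then
            [cur.reverse ++ l.takeWhile (· ≠ '_'), (l.dropWhile (· ≠ '_')).tail]
           else [cur.reverse ++ l]) := by
  induction l with
  | nil =>
    intro fuel cur acc hf
    cases fuel with
    | zero => omega
    | succ f => simp [PySem.Chars.splitOnMax.go]
  | cons c rest ih =>
    intro fuel cur acc hf
    cases fuel with
    | zero => simp at hf
    | succ f =>
      by_cases hc : c = '_'
      · subst hc
        simp only [PySem.Chars.splitOnMax.go, List.isPrefixOf, BEq.rfl, Bool.true_and,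
          if_true, if_neg (by omega : ¬ (1 : Nat) = 0)]
        rw [pv_go_zero f (by simp at hf; omega) _ [] _]
        simp
      · have hpre : ['_'].isPrefixOf (c :: rest) = false := by
          simp [List.isPrefixOf]; exact fun h => absurd h.symm hc
        simp only [PySem.Chars.splitOnMax.go, hpre, if_neg (by omega : ¬ (1 : Nat) = 0)]
        rw [show (PySem.Chars.splitOnMax.go ['_'] f 1 rest (c :: cur) acc) = _ from
          ih f (c :: cur) acc (by simp at hf ⊢; omega)]
        simp [List.mem_cons, hc]
        by_cases hr : '_' ∈ rest <;> simp [hr, Ne.symm hc]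

theorem pv_splitOnMax_eq (l : List Char) (h : '_' ∈ l) :
    PySem.Chars.splitOnMax l ['_'] 1 =
      [l.takeWhile (· ≠ '_'), (l.dropWhile (· ≠ '_')).tail] := by
  rw [PySem.Chars.splitOnMax, if_neg (by omega)]
  rw [show ((1 : Int)).toNat = 1 from rfl, pv_go_one l (l.length + 1) [] [] (by omega)]
  simp [h]

-- the inner alias scan finds nothing when the table is absent
theorem pv_aliasScan_none (table : String) (as : List String) (h : table ∉ as) :
    pvA_aliasScan table as = none := by
  induction as with
  | nil => rfl
  | cons a rest ih =>
    rw [pvA_aliasScan]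
    rw [if_neg (by intro hx; exact h (hx ▸ List.mem_cons_self ..))]
    exact ih (fun hx => h (List.mem_cons_of_mem _ hx))

-- both fallback loops agree on lists of non-empty aliases
theorem pv_fallback_eq (c0 : Char) (as : List String) (h : ∀ a ∈ as, a ≠ "") :
    pvA_fallbackLoop c0 as = pvB_fallbackLoop c0 as := by
  induction as with
  | nil => rfl
  | cons a rest ih =>
    have ha : a ≠ "" := h a (List.mem_cons_self ..)
    have hl : a.toList ≠ [] := fun hx => ha (String.toList_eq_nil_iff.mp hx)
    rw [pvA_fallbackLoop, pvB_fallbackLoop]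
    cases hc : a.toList with
    | nil => exact absurd hc hl
    | cons ch cs =>
      have hg : PySem.Str.pyGet? a 0 = some ch := by
        simp [PySem.Str.pyGet?, hc, PySem.Chars.pyGet?_eq_listPyGet?]
      have hsw : PySem.Chars.startswith (ch :: cs) [c0] = decide (ch = c0) := by
        show List.isPrefixOf [c0] (ch :: cs) = _
        simp only [List.isPrefixOf, Bool.and_true, Bool.beq_eq_decide_eq]
        exact decide_eq_decide.mpr eq_comm
      simp only [hg, hsw]
      by_cases hx : ch = c0
      · simp [hx]
      · simp [hx, ih (fun a ha => h a (List.mem_cons_of_mem _ ha))]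

-- the sorted prefix list is a fixed literal
theorem pv_sorted_keys :
    PySem.List.sorted pvTableColPrefix.keys List.length true =
      [['p','s','_'],['l','_'],['o','_'],['c','_'],['s','_'],['p','_'],['n','_'],['r','_']] := by
  decide

-- ===== VERDICT (by name: the statement is the Claim_ definition above) =====
theorem guess_alias_from_column_py_spec : Claim_equal_guess_alias_from_column_py := by
  intro col ja na _hdom hpre
  unfold Spec_guess_alias_from_column_py
  unfold guess_alias_from_column_py guess_alias_from_column_py_alt
  rw [pv_sorted_keys]
  by_cases hu : '_' ∈ col.toList
  · -- col_name contains an underscore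
    have hin : PySem.Str.isIn "_" col = true := (pv_isIn_underscore col).mpr hu
    have hne : ∀ a ∈ ja ++ [na], a ≠ "" := by
      intro a ha h; exact hpre hin (h ▸ ha)
    have hcol : col.toList ≠ [] := by intro hx; rw [hx] at hu; cases hu
    obtain ⟨c0, cs, hc⟩ : ∃ c0 cs, col.toList = c0 :: cs := by
      cases hx : col.toList with
      | nil => exact absurd hx hcol
      | cons c0 cs => exact ⟨c0, cs, rfl⟩
    have hget0 : PySem.Str.pyGet? col 0 = some c0 := by
      simp [PySem.Str.pyGet?, hc, PySem.Chars.pyGet?_eq_listPyGet?]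
    have hfb : pvB_fallback col (ja ++ [na]) = pvA_fallbackLoop c0 (ja ++ [na]) := by
      rw [pvB_fallback, hget0, pv_fallback_eq c0 _ hne]
    have hkey : (PySem.List.pyGet? (PySem.Chars.splitOnMax col.toList ['_'] 1) 0) =
        some (col.toList.takeWhile (· ≠ '_')) := by
      rw [pv_splitOnMax_eq col.toList hu, PySem.List.pyGet?_zero_cons]
    set t := col.toList.takeWhile (· ≠ '_') with ht
    have hsw : ∀ w : List Char, '_' ∉ w →
        (PySem.Chars.startswith col.toList (w ++ ['_']) = true ↔ t = w) :=
      fun w hw => pv_startswith_iff col.toList w hw hu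
    have hB : ∀ w : List Char, '_' ∉ w →
        PySem.Chars.startswith col.toList (w ++ ['_']) = decide (t = w) := by
      intro w hw
      by_cases hx : t = w
      · simp [(hsw w hw).mpr hx, hx]
      · have hfalse : PySem.Chars.startswith col.toList (w ++ ['_']) = false := by
          cases hv : PySem.Chars.startswith col.toList (w ++ ['_']) with
          | false => rfl
          | true => exact absurd ((hsw w hw).mp hv) hx
        simp [hfalse, hx]
    have E1 := hB ['p','s'] (by decide)
    have E2 := hB ['l'] (by decide)
    have E3 := hB ['o'] (by decide)
    have E4 := hB ['c'] (by decide)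
    have E5 := hB ['s'] (by decide)
    have E6 := hB ['p'] (by decide)
    have E7 := hB ['n'] (by decide)
    have E8 := hB ['r'] (by decide)
    simp only [List.cons_append, List.nil_append] at E1 E2 E3 E4 E5 E6 E7 E8
    have hA1 : pvTableColPrefix.get? ['p','s','_'] = some "partsupp" := by decide
    have hA2 : pvTableColPrefix.get? ['l','_'] = some "lineitem" := by decide
    have hA3 : pvTableColPrefix.get? ['o','_'] = some "orders" := by decide
    have hA4 : pvTableColPrefix.get? ['c','_'] = some "customer" := by decide
    have hA5 : pvTableColPrefix.get? ['s','_'] = some "supplier" := by decide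
    have hA6 : pvTableColPrefix.get? ['p','_'] = some "part" := by decide
    have hA7 : pvTableColPrefix.get? ['n','_'] = some "nation" := by decide
    have hA8 : pvTableColPrefix.get? ['r','_'] = some "region" := by decide
    have hGB : pvTableColPrefix.get? (t ++ ['_']) =
        if t = ['l'] then some "lineitem" else if t = ['o'] then some "orders"
        else if t = ['c'] then some "customer" else if t = ['s'] then some "supplier"
        else if t = ['p'] then some "part" else if t = ['p','s'] then some "partsupp"
        else if t = ['n'] then some "nation" else if t = ['r'] then some "region" else none := by
      have hd : pvTableColPrefix = ⟨[(['l','_'], "lineitem"), (['o','_'], "orders"),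
          (['c','_'], "customer"), (['s','_'], "supplier"), (['p','_'], "part"),
          (['p','s','_'], "partsupp"), (['n','_'], "nation"), (['r','_'], "region")]⟩ := by decide
      have hb : ∀ w : List Char, ((w ++ ['_']) == t ++ ['_']) = decide (t = w) := by
        intro w
        rw [Bool.beq_eq_decide_eq]
        by_cases hx : t = w
        · simp [hx]
        · simp [hx, Ne.symm hx]
      rw [hd]
      have hb1 : ((['l','_'] : List Char) == t ++ ['_']) = decide (t = ['l']) := by simpa using hb ['l']
      have hb2 : ((['o','_'] : List Char) == t ++ ['_']) = decide (t = ['o']) := by simpa using hb ['o']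
      have hb3 : ((['c','_'] : List Char) == t ++ ['_']) = decide (t = ['c']) := by simpa using hb ['c']
      have hb4 : ((['s','_'] : List Char) == t ++ ['_']) = decide (t = ['s']) := by simpa using hb ['s']
      have hb5 : ((['p','_'] : List Char) == t ++ ['_']) = decide (t = ['p']) := by simpa using hb ['p']
      have hb6 : ((['p','s','_'] : List Char) == t ++ ['_']) = decide (t = ['p','s']) := by simpa using hb ['p','s']
      have hb7 : ((['n','_'] : List Char) == t ++ ['_']) = decide (t = ['n']) := by simpa using hb ['n']
      have hb8 : ((['r','_'] : List Char) == t ++ ['_']) = decide (t = ['r']) := by simpa using hb ['r']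
      simp only [PySem.Dict.get?_mk_cons, hb1, hb2, hb3, hb4, hb5, hb6, hb7, hb8,
        show ((⟨[]⟩ : PySem.Dict (List Char) String).get? (t ++ ['_']) = none) from rfl,
        decide_eq_true_eq]
    simp only [hin, if_true, hkey]
    simp only [pvA_prefixLoop, E1, E2, E3, E4, E5, E6, E7, E8,
      hA1, hA2, hA3, hA4, hA5, hA6, hA7, hA8, hget0, hGB, hfb, decide_eq_true_eq]
    by_cases h1 : t = ['p','s']
    · by_cases hm : "partsupp" ∈ ja ++ [na]
      · simp [h1, hm]
      · simp [h1, hm, pv_aliasScan_none _ _ hm]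
    · by_cases h2 : t = ['l']
      · by_cases hm : "lineitem" ∈ ja ++ [na]
        · simp [h2, hm]
        · simp [h2, hm, pv_aliasScan_none _ _ hm]
      · by_cases h3 : t = ['o']
        · by_cases hm : "orders" ∈ ja ++ [na]
          · simp [h3, hm]
          · simp [h3, hm, pv_aliasScan_none _ _ hm]
        · by_cases h4 : t = ['c']
          · by_cases hm : "customer" ∈ ja ++ [na]
            · simp [h4, hm]
            · simp [h4, hm, pv_aliasScan_none _ _ hm]
          · by_cases h5 : t = ['s']
            · by_cases hm : "supplier" ∈ ja ++ [na]
              · simp [h5, hm]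
              · simp [h5, hm, pv_aliasScan_none _ _ hm]
            · by_cases h6 : t = ['p']
              · by_cases hm : "part" ∈ ja ++ [na]
                · simp [h6, hm]
                · simp [h6, hm, pv_aliasScan_none _ _ hm]
              · by_cases h7 : t = ['n']
                · by_cases hm : "nation" ∈ ja ++ [na]
                  · simp [h7, hm]
                  · simp [h7, hm, pv_aliasScan_none _ _ hm]
                · by_cases h8 : t = ['r']
                  · by_cases hm : "region" ∈ ja ++ [na]
                    · simp [h8, hm]
                    · simp [h8, hm, pv_aliasScan_none _ _ hm]
                  · simp [h1, h2, h3, h4, h5, h6, h7, h8]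
  · -- no underscore: both sides return none
    have hin : PySem.Str.isIn "_" col = false := by
      cases hx : PySem.Str.isIn "_" col with
      | false => rfl
      | true => exact absurd ((pv_isIn_underscore col).mp hx) hu
    have hf : ∀ w : List Char, '_' ∈ w → PySem.Chars.startswith col.toList w = false :=
      fun w hw => pv_startswith_false col.toList w hw hu
    have F1 := hf ['p','s','_'] (by decide)
    have F2 := hf ['l','_'] (by decide)
    have F3 := hf ['o','_'] (by decide)
    have F4 := hf ['c','_'] (by decide)
    have F5 := hf ['s','_'] (by decide)
    have F6 := hf ['n','_'] (by decide)
    have F7 := hf ['r','_'] (by decide)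
    have F8 := hf ['p','_'] (by decide)
    have hin2 : PySem.Chars.isIn ['_'] col.toList = false := hin
    simp [pvA_prefixLoop, F1, F2, F3, F4, F5, F6, F7, F8, hin2]
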